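-- pv_equiv track=rewrite | github.com/AbdihamdAbdala/COM4402-Programming | WK4/Session4/ds/group_marks.py | group_marks
-- ===== SOURCE A (Python) =====
-- def group_marks(marks):
--     """Group marks into 'Fail', 'Pass', and 'Distinction
--     marks: list of integers (0..100)
--     Returns a dict:
--     {"Fail": [...],
--     "Pass": [...],
--     "Distinction": [...]}
--     Raise TypeError if marks is not a list or if any element is not int.
--     Raise ValueError if any mark is outside 0..100.
--     """
--     group_marking = {}
--     group_marking["Fail"] = []
--     group_marking["Pass"] = []
--     group_marking["Distinction"] = []
--
--     if not type(marks) is list: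
--         raise TypeError("Marks is not a list")
--
--     for mark in marks:
--         if mark < 0 or mark > 100:
--             raise ValueError("Mark must be in range 0-100")
--         if mark < 40:
--             group_marking["Fail"].append(mark)
--         elif mark > 39 and mark < 70:
--             group_marking["Pass"].append(mark)
--         elif mark > 69:
--             group_marking["Distinction"].append(mark)
--
--     return group_marking
-- ===== SOURCE B (Python) =====
-- def group_marks(marks):
--     """Group marks into 'Fail', 'Pass', 'Distinction' buckets.
--     Validate first, then build each bucket by an independent filtering pass."""
--     if type(marks) is not list:
--         raise TypeError("Marks is not a list")
--     for m in marks: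
--         if m < 0 or m > 100:
--             raise ValueError("Mark must be in range 0-100")
--     return {
--         "Fail": [m for m in marks if m < 40],
--         "Pass": [m for m in marks if 40 <= m < 70],
--         "Distinction": [m for m in marks if m >= 70],
--     }
-- ===== Notes on version B (the rewrite author's own statement) =====
-- stated objective: simpler
-- what changed: A interleaves validation and bucketing in one loop that appends to a pre-built dict; B validates in a separate pass and then builds each bucket with an independent filtering comprehension, so no mutable dict state is threaded through the loop.
import Mathlib
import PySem

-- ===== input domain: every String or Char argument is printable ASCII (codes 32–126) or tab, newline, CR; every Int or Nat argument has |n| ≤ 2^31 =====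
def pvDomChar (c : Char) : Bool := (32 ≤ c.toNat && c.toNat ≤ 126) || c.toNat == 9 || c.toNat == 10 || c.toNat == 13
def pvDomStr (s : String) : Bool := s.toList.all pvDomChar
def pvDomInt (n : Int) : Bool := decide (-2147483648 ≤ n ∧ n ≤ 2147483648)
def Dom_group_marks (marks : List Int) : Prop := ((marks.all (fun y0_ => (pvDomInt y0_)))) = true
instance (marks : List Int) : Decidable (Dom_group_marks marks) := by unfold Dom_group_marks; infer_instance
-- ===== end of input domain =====

-- B replaces A's single interleaved validate-and-append-to-dict loop with a separate
-- validation pass followed by three independent filtering passes (objective: simpler).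


-- ===== PORT A =====
-- A builds a dict with the three empty buckets, then one loop over marks that range-checks
-- each mark (Python raises ValueError out of range — those inputs are outside Pre_; the
-- port leaves the dict unchanged there) and appends it to the matching bucket.
def group_marks (marks : List Int) : List (String × List Int) :=
  let d0 : PySem.Dict String (List Int) :=
    ((PySem.Dict.empty.insert "Fail" []).insert "Pass" []).insert "Distinction" []
  let d := marks.foldl (fun d mark =>
    if mark < 0 || mark > 100 then d  -- Python: raise ValueError (excluded by Pre_)
    else if mark < 40 then d.modify "Fail" [] (· ++ [mark])
    else if mark > 39 && mark < 70 then d.modify "Pass" [] (· ++ [mark])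
    else if mark > 69 then d.modify "Distinction" [] (· ++ [mark])
    else d) d0
  d.items

-- ===== PORT B =====
-- B: (validation pass is the raising pass, excluded by Pre_), then three filters.
def group_marks_alt (marks : List Int) : List (String × List Int) :=
  [("Fail", marks.filter (fun m => m < 40)),
   ("Pass", marks.filter (fun m => 40 ≤ m && m < 70)),
   ("Distinction", marks.filter (fun m => m ≥ 70))]

-- ===== PRECONDITION & SPEC =====
-- Pre_ excludes exactly the inputs where Python A raises ValueError: a mark outside 0..100.
def Pre_group_marks (marks : List Int) : Prop := ∀ m ∈ marks, 0 ≤ m ∧ m ≤ 100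
instance (marks : List Int) : Decidable (Pre_group_marks marks) := by unfold Pre_group_marks; infer_instance
def pvWitness_group_marks : List Int := [5, 40, 69, 70, 100, 0]

def Spec_group_marks (marks : List Int) (out : List (String × List Int)) : Prop := out = group_marks_alt marks
instance (marks : List Int) (out : List (String × List Int)) : Decidable (Spec_group_marks marks out) := by unfold Spec_group_marks; infer_instance

-- ===== CLAIM =====
def Claim_equal_group_marks : Prop := ∀ (marks : List Int), Dom_group_marks marks → Pre_group_marks marks → Spec_group_marks marks (group_marks marks)

-- ===== LEMMAS AND PROOFS =====

-- Loop invariant: folding A's step over marks, starting from the three buckets f/p/d,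
-- appends to each bucket exactly the filter B computes.
lemma group_marks_loop (marks : List Int) (f p q : List Int)
    (h : ∀ m ∈ marks, 0 ≤ m ∧ m ≤ 100) :
    marks.foldl (fun d mark =>
      if mark < 0 || mark > 100 then d
      else if mark < 40 then d.modify "Fail" [] (· ++ [mark])
      else if mark > 39 && mark < 70 then d.modify "Pass" [] (· ++ [mark])
      else if mark > 69 then d.modify "Distinction" [] (· ++ [mark])
      else d)
      (PySem.Dict.mk [("Fail", f), ("Pass", p), ("Distinction", q)]) =
    PySem.Dict.mk [("Fail", f ++ marks.filter (fun m => m < 40)),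
                   ("Pass", p ++ marks.filter (fun m => 40 ≤ m && m < 70)),
                   ("Distinction", q ++ marks.filter (fun m => m ≥ 70))] := by
  induction marks generalizing f p q with
  | nil => simp
  | cons m rest ih =>
    obtain ⟨h0, h100⟩ := h m (List.mem_cons_self ..)
    have hrest : ∀ x ∈ rest, 0 ≤ x ∧ x ≤ 100 := fun x hx => h x (List.mem_cons_of_mem _ hx)
    rw [List.foldl_cons]
    by_cases h40 : m < 40
    · have hstep : (if m < 0 || m > 100 then PySem.Dict.mk [("Fail", f), ("Pass", p), ("Distinction", q)]
          else if m < 40 then (PySem.Dict.mk [("Fail", f), ("Pass", p), ("Distinction", q)]).modify "Fail" [] (· ++ [m])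
          else if m > 39 && m < 70 then (PySem.Dict.mk [("Fail", f), ("Pass", p), ("Distinction", q)]).modify "Pass" [] (· ++ [m])
          else if m > 69 then (PySem.Dict.mk [("Fail", f), ("Pass", p), ("Distinction", q)]).modify "Distinction" [] (· ++ [m])
          else PySem.Dict.mk [("Fail", f), ("Pass", p), ("Distinction", q)])
          = PySem.Dict.mk [("Fail", f ++ [m]), ("Pass", p), ("Distinction", q)] := by
        rw [if_neg (by simp; omega), if_pos h40]; rfl
      rw [hstep, ih _ _ _ hrest]
      simp [List.filter_cons, h40, show ¬ (40 ≤ m ∧ m < 70) by omega, show ¬ m ≥ 70 by omega]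
    · by_cases h70 : m < 70
      · have hstep : (if m < 0 || m > 100 then PySem.Dict.mk [("Fail", f), ("Pass", p), ("Distinction", q)]
            else if m < 40 then (PySem.Dict.mk [("Fail", f), ("Pass", p), ("Distinction", q)]).modify "Fail" [] (· ++ [m])
            else if m > 39 && m < 70 then (PySem.Dict.mk [("Fail", f), ("Pass", p), ("Distinction", q)]).modify "Pass" [] (· ++ [m])
            else if m > 69 then (PySem.Dict.mk [("Fail", f), ("Pass", p), ("Distinction", q)]).modify "Distinction" [] (· ++ [m])
            else PySem.Dict.mk [("Fail", f), ("Pass", p), ("Distinction", q)])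
            = PySem.Dict.mk [("Fail", f), ("Pass", p ++ [m]), ("Distinction", q)] := by
          rw [if_neg (by simp; omega), if_neg h40, if_pos (by simp; omega)]; rfl
        rw [hstep, ih _ _ _ hrest]
        simp [List.filter_cons, h40, show 40 ≤ m ∧ m < 70 by omega, show ¬ m ≥ 70 by omega]
      · have hstep : (if m < 0 || m > 100 then PySem.Dict.mk [("Fail", f), ("Pass", p), ("Distinction", q)]
            else if m < 40 then (PySem.Dict.mk [("Fail", f), ("Pass", p), ("Distinction", q)]).modify "Fail" [] (· ++ [m])
            else if m > 39 && m < 70 then (PySem.Dict.mk [("Fail", f), ("Pass", p), ("Distinction", q)]).modify "Pass" [] (· ++ [m])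
            else if m > 69 then (PySem.Dict.mk [("Fail", f), ("Pass", p), ("Distinction", q)]).modify "Distinction" [] (· ++ [m])
            else PySem.Dict.mk [("Fail", f), ("Pass", p), ("Distinction", q)])
            = PySem.Dict.mk [("Fail", f), ("Pass", p), ("Distinction", q ++ [m])] := by
          rw [if_neg (by simp; omega), if_neg h40, if_neg (by simp; omega), if_pos (by omega)]; rfl
        rw [hstep, ih _ _ _ hrest]
        simp [List.filter_cons, h40, show ¬ (40 ≤ m ∧ m < 70) by omega, show m ≥ 70 by omega]

-- ===== VERDICT =====
theorem group_marks_spec : Claim_equal_group_marks := by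
  intro marks _ hpre
  unfold Spec_group_marks group_marks group_marks_alt
  have hd0 : ((PySem.Dict.empty.insert "Fail" ([] : List Int)).insert "Pass" []).insert "Distinction" []
      = PySem.Dict.mk [("Fail", []), ("Pass", []), ("Distinction", [])] := by decide
  simp only [hd0, group_marks_loop marks [] [] [] hpre]
  rfl
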